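-- pv_equiv track=rewrite | github.com/96jhwei/Genetic-U-Net | code/model/genetic_unet/genetic_unet.py | check_active
-- ===== SOURCE A (Python) =====
-- def flatten(input_list):
--     output_list = []
--     while True:
--         if input_list == []:
--             break
--         for index, value in enumerate(input_list):
--
--             if type(value) == list:
--                 input_list = value + input_list[index + 1:]
--                 break
--             else:
--                 output_list.append(value)
--                 input_list.pop(index)
--                 break
--     return output_list
--
-- def check_active(node_num, connect_gene):
--     active = [None for _ in range(node_num)]
--     node_connect = []
--     j = 1
--     i = 0
--     for _ in range(node_num - 1):
--         node_connect.append(connect_gene[i:i + j])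
--         i = i + j
--         j += 1
--     for p, node in enumerate(node_connect):
--         if p != node_num - 2:
--             if sum(node) >= 1:
--                 active[p + 1] = True
--     for k in range(node_num):
--         for node in node_connect:
--             if k < len(node) and k != node_num - 1:
--                 if node[k] == 1:
--                     active[k] = True
--
--             elif k == node_num - 1:
--                 if sum(node) >= 1:
--                     active[k] = True
--
--     pre_index = [None for _ in range(node_num)]
--     for m in range(node_num):
--         if active[m]:
--             if m == 0:
--                 pre_index[m] = [m]
--             else:
--                 p_index = []
--                 if sum(node_connect[m - 1]) == 0:
--                     pre_index[m] = [0]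
--                 else:
--                     for index, con in enumerate(node_connect[m - 1]):
--                         if con == 1:
--                             p_index.append(index + 1)
--                     if len(p_index) > 0:
--                         pre_index[m] = p_index
--     out_index = []
--     for t in range(node_num):
--         pre_index_ = flatten(pre_index[t + 1:])
--         if active[t] and t + 1 not in pre_index_:
--             out_index.append(t + 1)
--     if sum([1 for act in active if act is not None]) == 0:
--         out_index = [0]
--     return active, pre_index, out_index
-- ===== SOURCE B (Python) =====
-- def check_active(node_num, connect_gene):
--     # Build the per-node connection rows once (row p = incoming gene bits of node p+1).
--     rows = []
--     i = 0
--     for j in range(1, node_num):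
--         rows.append(connect_gene[i:i + j])
--         i += j
--     # Edge summaries derived in one sweep over the rows.
--     any_edge = any(sum(r) >= 1 for r in rows)
--
--     def has_out(k):
--         return any(k < len(r) and r[k] == 1 for r in rows)
--
--     active = []
--     for k in range(node_num):
--         if k == node_num - 1:
--             a = any_edge
--         elif k == 0:
--             a = has_out(0)
--         else:
--             a = sum(rows[k - 1]) >= 1 or has_out(k)
--         active.append(True if a else None)
--
--     pre_index = []
--     for m in range(node_num):
--         if active[m] is None:
--             pre_index.append(None)
--         elif m == 0:
--             pre_index.append([0])
--         else:
--             row = rows[m - 1]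
--             if sum(row) == 0:
--                 pre_index.append([0])
--             else:
--                 srcs = [idx + 1 for idx, c in enumerate(row) if c == 1]
--                 pre_index.append(srcs if srcs else None)
--
--     # Every value stored in pre_index[s] is <= s, so "t+1 occurs in some later
--     # pre_index entry" equals "t+1 occurs in any pre_index entry": one global set.
--     referenced = {v for lst in pre_index if lst is not None for v in lst}
--     out_index = [t + 1 for t in range(node_num)
--                  if active[t] and t + 1 not in referenced]
--     if not any(a is not None for a in active):
--         out_index = [0]
--     return active, pre_index, out_index
-- ===== Notes on version B (the rewrite author's own statement) =====
-- stated objective: faster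
-- what changed: B builds the connection rows once, derives each node's active flag from closed per-node edge conditions instead of A's two mutating set-loops, constructs pre_index directly entry by entry, and replaces A's per-node flatten of every pre_index suffix with one global referenced-index set (valid because every index stored in pre_index[s] is at most s).
import Mathlib
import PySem

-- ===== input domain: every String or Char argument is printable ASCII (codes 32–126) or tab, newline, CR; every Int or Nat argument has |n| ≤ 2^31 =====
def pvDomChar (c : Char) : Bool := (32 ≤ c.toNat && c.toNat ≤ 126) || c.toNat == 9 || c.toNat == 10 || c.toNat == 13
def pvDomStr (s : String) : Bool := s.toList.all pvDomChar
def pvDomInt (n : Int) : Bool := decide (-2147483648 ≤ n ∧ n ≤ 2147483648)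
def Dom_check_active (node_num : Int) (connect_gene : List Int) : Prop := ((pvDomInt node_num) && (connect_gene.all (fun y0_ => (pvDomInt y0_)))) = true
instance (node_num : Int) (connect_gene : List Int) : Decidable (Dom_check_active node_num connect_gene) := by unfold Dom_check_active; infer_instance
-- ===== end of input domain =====

-- B recomputes A's result with a build-once-then-derive decomposition: one shared rows build,
-- per-node closed conditions for `active`, a direct per-row construction of `pre_index`, and a
-- single global referenced-index set replacing A's repeated flatten of each pre_index suffix.

-- ===== PORT A =====

-- The heterogeneous values A's `flatten` sees at its call site: None, an int, or a list of ints.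
inductive PvItem
  | vnone : PvItem
  | vint : Int → PvItem
  | vlist : List Int → PvItem
deriving DecidableEq, Repr

def pvItemSize : PvItem → Nat
  | .vlist l => l.length + 1
  | _ => 1

-- Literal port of A's `flatten`: the enumerate loop always breaks at index 0, so each step
-- either expands a list head in place or moves a scalar head (int or None) to the output.
def pvFlatten : List PvItem → List (Option Int)
  | [] => []
  | .vlist l :: rest => pvFlatten (l.map PvItem.vint ++ rest)
  | .vnone :: rest => none :: pvFlatten rest
  | .vint x :: rest => some x :: pvFlatten rest
termination_by l => (l.map pvItemSize).sum
decreasing_by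
  all_goals (simp [pvItemSize, List.map_append, List.map_map, Function.comp_def, List.sum_append]; try omega)

def pvItemOf : Option (List Int) → PvItem
  | none => .vnone
  | some l => .vlist l

def check_active (node_num : Int) (connect_gene : List Int) :
    List (Option Bool) × List (Option (List Int)) × List Int :=
  -- active = [None for _ in range(node_num)]
  let active0 : List (Option Bool) := List.replicate node_num.toNat none
  -- for _ in range(node_num - 1): node_connect.append(connect_gene[i:i+j]); i += j; j += 1
  let built := (PySem.List.pyRange 0 (node_num - 1) 1).foldl
    (fun (st : List (List Int) × Int × Int) _ =>
      (st.1 ++ [PySem.List.slice connect_gene (some st.2.1) (some (st.2.1 + st.2.2))],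
       st.2.1 + st.2.2, st.2.2 + 1))
    ([], 0, 1)
  let node_connect := built.1
  -- for p, node in enumerate(node_connect): if p != node_num - 2: if sum(node) >= 1: active[p+1] = True
  let active1 := (PySem.List.enumerate node_connect).foldl
    (fun act pn =>
      if pn.1 ≠ node_num - 2 then
        if pn.2.sum ≥ 1 then PySem.List.pySetD act (pn.1 + 1) (some true) else act
      else act)
    active0
  -- for k in range(node_num): for node in node_connect: ...
  let active2 := (PySem.List.pyRange 0 node_num 1).foldl
    (fun act k =>
      node_connect.foldl
        (fun act node =>
          if k < PySem.List.len node ∧ k ≠ node_num - 1 then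
            if PySem.List.pyGetD node k 0 = 1 then PySem.List.pySetD act k (some true) else act
          else if k = node_num - 1 then
            if node.sum ≥ 1 then PySem.List.pySetD act k (some true) else act
          else act)
        act)
    active1
  -- pre_index = [None]*node_num; for m in range(node_num): ...
  let pre0 : List (Option (List Int)) := List.replicate node_num.toNat none
  let pre := (PySem.List.pyRange 0 node_num 1).foldl
    (fun pre m =>
      if PySem.List.pyGetD active2 m none = some true then
        if m = 0 then PySem.List.pySetD pre m (some [m])
        else
          let row := PySem.List.pyGetD node_connect (m - 1) []
          if row.sum = 0 then PySem.List.pySetD pre m (some [0])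
          else
            let p_index := (PySem.List.enumerate row).foldl
              (fun acc ic => if ic.2 = 1 then acc ++ [ic.1 + 1] else acc) []
            if p_index.length > 0 then PySem.List.pySetD pre m (some p_index) else pre
      else pre)
    pre0
  -- out_index loop: pre_index_ = flatten(pre_index[t+1:]); if active[t] and t+1 not in pre_index_: append
  let out0 := (PySem.List.pyRange 0 node_num 1).foldl
    (fun out t =>
      let pre_ := pvFlatten ((PySem.List.slice pre (some (t + 1)) none).map pvItemOf)
      if PySem.List.pyGetD active2 t none = some true ∧ some (t + 1) ∉ pre_ then
        out ++ [t + 1]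
      else out)
    []
  -- if sum([1 for act in active if act is not None]) == 0: out_index = [0]
  let out_index :=
    if (((active2.filter (fun a => a != none)).map (fun _ => (1 : Int))).sum = 0) then [0] else out0
  (active2, pre, out_index)

-- ===== PORT B =====
def check_active_alt (node_num : Int) (connect_gene : List Int) :
    List (Option Bool) × List (Option (List Int)) × List Int :=
  -- rows built once: for j in range(1, node_num): rows.append(connect_gene[i:i+j]); i += j
  let builtB := (PySem.List.pyRange 1 node_num 1).foldl
    (fun (st : List (List Int) × Int) j =>
      (st.1 ++ [PySem.List.slice connect_gene (some st.2) (some (st.2 + j))], st.2 + j))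
    ([], 0)
  let rows := builtB.1
  -- any_edge = any(sum(r) >= 1 for r in rows)
  let any_edge : Bool := rows.any (fun r => decide (r.sum ≥ 1))
  -- has_out(k) = any(k < len(r) and r[k] == 1 for r in rows)
  let has_out : Int → Bool := fun k =>
    rows.any (fun r => decide (k < PySem.List.len r) && (PySem.List.pyGetD r k 0 == 1))
  -- active[k] from the edge summaries, one closed condition per k
  let active := (PySem.List.pyRange 0 node_num 1).map
    (fun k =>
      let a : Bool :=
        if k = node_num - 1 then any_edge
        else if k = 0 then has_out 0
        else decide ((PySem.List.pyGetD rows (k - 1) []).sum ≥ 1) || has_out k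
      if a then some true else none)
  -- pre_index built directly, one entry per node
  let pre_index := (PySem.List.pyRange 0 node_num 1).map
    (fun m =>
      if PySem.List.pyGetD active m none = none then none
      else if m = 0 then some [(0 : Int)]
      else
        let row := PySem.List.pyGetD rows (m - 1) []
        if row.sum = 0 then some [(0 : Int)]
        else
          let srcs := ((PySem.List.enumerate row).filter
            (fun ic => ic.2 == 1)).map (fun ic => ic.1 + 1)
          if srcs = [] then none else some srcs)
  -- referenced = {v for lst in pre_index if lst is not None for v in lst}
  let referenced : PySem.Set Int := PySem.Set.ofList (pre_index.flatMap (fun o => o.getD []))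
  let out0 := ((PySem.List.pyRange 0 node_num 1).filter
      (fun t => (PySem.List.pyGetD active t none == some true)
        && !(referenced.contains (t + 1)))).map (fun t => t + 1)
  let out_index := if !(active.any (fun a => a != none)) then [0] else out0
  (active, pre_index, out_index)

-- ===== PRECONDITION & SPEC =====
def Spec_check_active (node_num : Int) (connect_gene : List Int) (out : List (Option Bool) × List (Option (List Int)) × List Int) : Prop := out = check_active_alt node_num connect_gene
instance (node_num : Int) (connect_gene : List Int) (out : List (Option Bool) × List (Option (List Int)) × List Int) : Decidable (Spec_check_active node_num connect_gene out) := by unfold Spec_check_active; infer_instance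

-- ===== CLAIM (what is proved, stated in full; the proofs are below) =====
def Claim_equal_check_active : Prop := ∀ (node_num : Int) (connect_gene : List Int), Dom_check_active node_num connect_gene → Spec_check_active node_num connect_gene (check_active node_num connect_gene)

-- ===== LEMMAS AND PROOFS =====

-- generic: fold of conditional set preserves length
theorem pvLengthFoldlSet {ι α : Type} (l : List ι) (hit : ι → Bool) (pos : ι → Nat) (w : ι → α)
    (act : List α) :
    (l.foldl (fun a x => if hit x then a.set (pos x) (w x) else a) act).length = act.length := by
  induction l generalizing act with
  | nil => rfl
  | cons x xs ih =>
    simp only [List.foldl_cons]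
    split <;> simp [ih]

-- generic: getElem? of a fold that conditionally sets a CONSTANT value at per-element positions
theorem pvGetFoldlSetConst {ι α : Type} (l : List ι) (hit : ι → Bool) (pos : ι → Nat) (v : α)
    (act : List α) (j : Nat) :
    (l.foldl (fun a x => if hit x then a.set (pos x) v else a) act)[j]?
      = if j < act.length ∧ ∃ x ∈ l, hit x = true ∧ pos x = j then some v else act[j]? := by
  induction l generalizing act with
  | nil => simp
  | cons x xs ih =>
    simp only [List.foldl_cons]
    rw [ih]
    simp only [List.exists_mem_cons_iff]
    by_cases hx : hit x = true
    · simp only [hx, if_true, List.length_set, List.getElem?_set, true_and]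
      by_cases hEx : ∃ y ∈ xs, hit y = true ∧ pos y = j
      · by_cases hj : j < act.length
        · simp [hEx, hj]
        · simp only [hj, false_and, if_false]
          by_cases hpx : pos x = j
          · simp [hpx, hj, List.getElem?_eq_none (le_of_not_gt hj)]
          · simp [hpx]
      · by_cases hpx : pos x = j
        · by_cases hj : j < act.length
          · simp [hEx, hpx, hj]
          · simp [hEx, hpx, hj, List.getElem?_eq_none (le_of_not_gt hj)]
        · simp [hEx, hpx]
    · simp [hx]

-- generic: getElem? of a fold over range that conditionally sets w m at index m
theorem pvGetFoldlRangeSet {α : Type} (n : Nat) (hit : Nat → Bool) (w : Nat → α)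
    (act : List α) (j : Nat) :
    ((List.range n).foldl (fun a m => if hit m then a.set m (w m) else a) act)[j]?
      = if j < n ∧ hit j = true ∧ j < act.length then some (w j) else act[j]? := by
  induction n with
  | zero => simp
  | succ n ih =>
    rw [List.range_succ, List.foldl_append]
    simp only [List.foldl_cons, List.foldl_nil]
    have hlen : ((List.range n).foldl (fun a m => if hit m then a.set m (w m) else a) act).length
        = act.length := pvLengthFoldlSet (List.range n) hit id w act
    by_cases hn : hit n = true
    · simp only [hn, if_true, List.getElem?_set, hlen, ih]
      by_cases hnj : n = j
      · subst hnj
        by_cases hj : n < act.length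
        · simp [hj, hn]
        · simp [hj, List.getElem?_eq_none (le_of_not_gt hj)]
      · by_cases hjn : j < n
        · simp [hnj, hjn, Nat.lt_succ_of_lt hjn]
        · have h' : ¬ j < n + 1 := by omega
          simp [hnj, hjn, h']
    · rw [if_neg hn, ih]
      by_cases hjn : j < n
      · simp [hjn, Nat.lt_succ_of_lt hjn]
      · by_cases hj : j = n
        · subst hj; simp [hn, hjn]
        · have h' : ¬ j < n + 1 := by omega
          simp [hjn, h']

-- generic: a fold whose every set targets the SAME position with the SAME value
theorem pvInnerFold {ι α : Type} (l : List ι) (hit : ι → Bool) (pos : Nat) (v : α)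
    (act : List α) :
    l.foldl (fun a x => if hit x then a.set pos v else a) act
      = if l.any hit then act.set pos v else act := by
  induction l generalizing act with
  | nil => simp
  | cons x xs ih =>
    simp only [List.foldl_cons, List.any_cons]
    by_cases hx : hit x = true
    · simp [hx, ih, List.set_set]
    · simp [hx, ih]

-- membership in PySem.List.enumerate
theorem pvMemEnumerate {α : Type} (xs : List α) (s : Int) (q : Int × α) :
    q ∈ PySem.List.enumerate xs s ↔ ∃ k : Nat, xs[k]? = some q.2 ∧ q.1 = s + k := by
  induction xs generalizing s with
  | nil => simp [PySem.List.enumerate]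
  | cons x xs ih =>
    simp only [PySem.List.enumerate, List.mem_cons, ih]
    constructor
    · rintro (rfl | ⟨k, hk, hq⟩)
      · exact ⟨0, by simp, by simp⟩
      · exact ⟨k + 1, by simpa using hk, by push_cast at hq ⊢; omega⟩
    · rintro ⟨k, hk, hq⟩
      cases k with
      | zero =>
        left
        simp at hk hq
        cases q; simp_all
      | succ k =>
        right
        exact ⟨k, by simpa using hk, by push_cast at hq ⊢; omega⟩

-- recursive form of A's node_connect builder (state: rows so far, i, j)
def pvBuildA (g : List Int) : Nat → List (List Int) × Int × Int
  | 0 => ([], 0, 1)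
  | n + 1 =>
    let r := pvBuildA g n
    (r.1 ++ [PySem.List.slice g (some r.2.1) (some (r.2.1 + r.2.2))], r.2.1 + r.2.2, r.2.2 + 1)

theorem pvBuildA_eq_foldl (g : List Int) (cnt : Nat) :
    (List.range cnt).foldl
      (fun (st : List (List Int) × Int × Int) _ =>
        (st.1 ++ [PySem.List.slice g (some st.2.1) (some (st.2.1 + st.2.2))],
         st.2.1 + st.2.2, st.2.2 + 1)) ([], 0, 1)
      = pvBuildA g cnt := by
  induction cnt with
  | zero => rfl
  | succ n ih => rw [List.range_succ, List.foldl_append, ih]; rfl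

theorem pvBuildA_j (g : List Int) (cnt : Nat) : (pvBuildA g cnt).2.2 = (cnt : Int) + 1 := by
  induction cnt with
  | zero => rfl
  | succ n ih =>
    simp only [pvBuildA, ih]
    push_cast
    ring

theorem pvBuildA_i_nonneg (g : List Int) (cnt : Nat) : 0 ≤ (pvBuildA g cnt).2.1 := by
  induction cnt with
  | zero => simp [pvBuildA]
  | succ n ih =>
    have hj := pvBuildA_j g n
    simp only [pvBuildA]
    have : (0:Int) ≤ (n : Int) + 1 := by positivity
    omega

theorem pvBuildA_len (g : List Int) (cnt : Nat) : (pvBuildA g cnt).1.length = cnt := by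
  induction cnt with
  | zero => rfl
  | succ n ih => simp [pvBuildA, ih]

theorem pvBuildA_rowlen (g : List Int) (cnt : Nat) :
    ∀ p L, (pvBuildA g cnt).1[p]? = some L → L.length ≤ p + 1 := by
  induction cnt with
  | zero => intro p L h; simp [pvBuildA] at h
  | succ n ih =>
    intro p L h
    have hj := pvBuildA_j g n
    have hi := pvBuildA_i_nonneg g n
    have hlen := pvBuildA_len g n
    simp only [pvBuildA] at h
    rcases Nat.lt_or_ge p n with hp | hp
    · rw [List.getElem?_append_left (by omega)] at h
      exact ih p L h
    · by_cases hpn : p = n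
      · subst hpn
        rw [List.getElem?_append_right (by omega)] at h
        simp only [hlen, Nat.sub_self, List.getElem?_cons_zero, Option.some.injEq] at h
        subst h
        rw [PySem.List.slice_toNat g hi (by omega)]
        have h2 : (List.take (((pvBuildA g p).2.1 + (pvBuildA g p).2.2).toNat - (pvBuildA g p).2.1.toNat)
                (List.drop (pvBuildA g p).2.1.toNat g)).length
            ≤ ((pvBuildA g p).2.1 + (pvBuildA g p).2.2).toNat - (pvBuildA g p).2.1.toNat := by
          simp [List.length_take]
        omega
      · have hbig : ((pvBuildA g n).1
            ++ [PySem.List.slice g (some (pvBuildA g n).2.1)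
                (some ((pvBuildA g n).2.1 + (pvBuildA g n).2.2))]).length ≤ p := by
          simp [hlen]; omega
        rw [List.getElem?_eq_none hbig] at h
        cases h

theorem pvBuildB_eq_foldl (g : List Int) (cnt : Nat) :
    (List.range cnt).foldl
      (fun (st : List (List Int) × Int) (k : Nat) =>
        (st.1 ++ [PySem.List.slice g (some st.2) (some (st.2 + (1 + (k : Int))))],
         st.2 + (1 + (k : Int)))) ([], 0)
      = ((pvBuildA g cnt).1, (pvBuildA g cnt).2.1) := by
  induction cnt with
  | zero => rfl
  | succ n ih =>
    rw [List.range_succ, List.foldl_append]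
    rw [ih]
    have hj := pvBuildA_j g n
    simp only [List.foldl_cons, List.foldl_nil, pvBuildA]
    rw [hj]
    have hc : (1 : Int) + (n : Int) = (n : Int) + 1 := by ring
    rw [hc]
theorem pvBeqDec {α : Type} [DecidableEq α] [BEq α] [LawfulBEq α] (a b : α) :
    (a == b) = decide (a = b) := by
  by_cases h : a = b <;> simp [h]

-- Bool test of A's second active loop for column j against one row
def pvHit2f (ng : Int) (j : Nat) (node : List Int) : Bool :=
  if (j : Int) < PySem.List.len node ∧ (j : Int) ≠ ng - 1 then
    decide (PySem.List.pyGetD node (j : Int) 0 = 1)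
  else if (j : Int) = ng - 1 then decide (node.sum ≥ 1)
  else false

-- Bool test of A's first active loop: does it mark index j?
def pvHit1 (ng : Int) (rows : List (List Int)) (j : Nat) : Bool :=
  match j with
  | 0 => false
  | k + 1 =>
    decide (k < rows.length) && decide ((k : Int) ≠ ng - 2)
      && decide ((rows.getD k []).sum ≥ 1)

-- the activity value both programs store at index j
def pvActv (ng : Int) (rows : List (List Int)) (j : Nat) : Option Bool :=
  if rows.any (pvHit2f ng j) || pvHit1 ng rows j then some true else none

theorem pvActv_cases (ng : Int) (rows : List (List Int)) (j : Nat) :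
    pvActv ng rows j = none ∨ pvActv ng rows j = some true := by
  unfold pvActv; split <;> simp

theorem pvHit1_iff (ng : Int) (rows : List (List Int)) (j : Nat) :
    pvHit1 ng rows j = true
      ↔ ∃ pn ∈ PySem.List.enumerate rows 0,
          (decide (pn.1 ≠ ng - 2) && decide (pn.2.sum ≥ 1)) = true ∧ (pn.1 + 1).toNat = j := by
  constructor
  · intro h
    cases j with
    | zero => simp [pvHit1] at h
    | succ k =>
      simp only [pvHit1, Bool.and_eq_true, decide_eq_true_eq] at h
      obtain ⟨⟨hk, hne⟩, hsum⟩ := h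
      have hsum' : (1 : Int) ≤ (rows[k]?.getD []).sum := by
        rwa [List.getD_eq_getElem?_getD] at hsum
      refine ⟨((k : Int), rows.getD k []), ?_, by simp [hne, hsum'], by omega⟩
      rw [pvMemEnumerate]
      exact ⟨k, by simp [List.getD_eq_getElem?_getD, List.getElem?_eq_getElem hk], by simp⟩
  · rintro ⟨pn, hmem, hcond, hpos⟩
    rw [pvMemEnumerate] at hmem
    obtain ⟨k, hget, hfst⟩ := hmem
    simp only [zero_add] at hfst
    have hk : k < rows.length := by
      by_contra hk
      rw [List.getElem?_eq_none (by omega)] at hget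
      cases hget
    have hj : j = k + 1 := by omega
    subst hj
    simp only [Bool.and_eq_true, decide_eq_true_eq] at hcond
    simp only [pvHit1, Bool.and_eq_true, decide_eq_true_eq]
    refine ⟨⟨hk, by rw [← hfst]; exact hcond.1⟩, ?_⟩
    have : rows.getD k [] = pn.2 := by
      simp [List.getD_eq_getElem?_getD, hget]
    rw [this]; exact hcond.2

-- A's two active loops compute exactly (range n).map (pvActv ng rows)
theorem pvActiveA_eq (ng : Int) (rows : List (List Int)) :
    (List.foldl
        (fun act k =>
          List.foldl
            (fun act node =>
              if k < PySem.List.len node ∧ k ≠ ng - 1 then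
                if PySem.List.pyGetD node k 0 = 1 then PySem.List.pySetD act k (some true) else act
              else if k = ng - 1 then
                if node.sum ≥ 1 then PySem.List.pySetD act k (some true) else act
              else act)
            act rows)
        (List.foldl
          (fun act pn =>
            if pn.1 ≠ ng - 2 then
              if pn.2.sum ≥ 1 then PySem.List.pySetD act (pn.1 + 1) (some true) else act
            else act)
          (List.replicate ng.toNat none) (PySem.List.enumerate rows))
        (PySem.List.pyRange 0 ng))
      = (List.range ng.toNat).map (pvActv ng rows) := by
  rw [PySem.List.pyRange_one 0 ng]
  simp only [Int.sub_zero, List.foldl_map, zero_add]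
  -- rewrite loop 1 into canonical conditional-set form
  have h1 : (List.foldl
      (fun act pn =>
        if pn.1 ≠ ng - 2 then
          if pn.2.sum ≥ 1 then PySem.List.pySetD act (pn.1 + 1) (some true) else act
        else act)
      (List.replicate ng.toNat none) (PySem.List.enumerate rows))
      = (PySem.List.enumerate rows).foldl
          (fun act pn => if decide (pn.1 ≠ ng - 2) && decide (pn.2.sum ≥ 1) then
              act.set (pn.1 + 1).toNat (some true) else act)
          (List.replicate ng.toNat none) := by
    apply PySem.List.foldl_congr_mem
    intro acc pn hmem
    rw [pvMemEnumerate] at hmem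
    obtain ⟨k, _, hfst⟩ := hmem
    have h0 : 0 ≤ pn.1 + 1 := by omega
    by_cases hne : pn.1 ≠ ng - 2
    · by_cases hsum : pn.2.sum ≥ 1
      · simp [hne, hsum, PySem.List.pySetD_of_nonneg _ _ h0]
      · simp [hne, hsum]
    · simp [hne]
  rw [h1]
  -- rewrite loop 2 (inner) into canonical conditional-set form
  have h2 : ∀ (act : List (Option Bool)) (x : Nat),
      List.foldl
        (fun act node =>
          if (x : Int) < PySem.List.len node ∧ (x : Int) ≠ ng - 1 then
            if PySem.List.pyGetD node (x : Int) 0 = 1 then PySem.List.pySetD act (x : Int) (some true) else act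
          else if (x : Int) = ng - 1 then
            if node.sum ≥ 1 then PySem.List.pySetD act (x : Int) (some true) else act
          else act)
        act rows
      = if rows.any (pvHit2f ng x) then act.set x (some true) else act := by
    intro act x
    rw [PySem.List.foldl_congr_mem rows _
      (fun act node => if pvHit2f ng x node then act.set x (some true) else act) act ?_]
    · exact pvInnerFold rows (pvHit2f ng x) x (some true) act
    · intro acc node _
      unfold pvHit2f
      simp only [PySem.List.pyGetD_natCast, PySem.List.pySetD_natCast, PySem.List.len_eq]
      by_cases hc1 : ((x : Int) < (node.length : Int) ∧ (x : Int) ≠ ng - 1)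
      · by_cases hd1 : node.getD x 0 = 1
        · simp [hc1, hd1]
        · simp [hc1, hd1]
      · by_cases hc2 : (x : Int) = ng - 1
        · by_cases hd2 : node.sum ≥ 1
          · simp [hc1, hc2, hd2]
          · simp [hc1, hc2, hd2]
        · have hlen : ¬ (x < node.length) := by
            intro h
            exact hc1 ⟨by exact_mod_cast h, hc2⟩
          simp [hc2, hlen]
  rw [PySem.List.foldl_congr_mem _ _
    (fun act (x : Nat) => if rows.any (pvHit2f ng x) then act.set x (some true) else act) _
    (fun acc x _ => h2 acc x)]
  -- pointwise characterisation
  apply List.ext_getElem?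
  intro j
  have hlen1 : ((PySem.List.enumerate rows).foldl
      (fun act pn => if decide (pn.1 ≠ ng - 2) && decide (pn.2.sum ≥ 1) then
          act.set (pn.1 + 1).toNat (some true) else act)
      (List.replicate ng.toNat (none : Option Bool))).length = ng.toNat := by
    rw [pvLengthFoldlSet (PySem.List.enumerate rows)
      (fun pn => decide (pn.1 ≠ ng - 2) && decide (pn.2.sum ≥ 1))
      (fun pn => (pn.1 + 1).toNat) (fun _ => some true)]
    exact List.length_replicate
  rw [pvGetFoldlRangeSet ng.toNat (fun x => rows.any (pvHit2f ng x)) (fun _ => some true)]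
  rw [pvGetFoldlSetConst (PySem.List.enumerate rows)
      (fun pn => decide (pn.1 ≠ ng - 2) && decide (pn.2.sum ≥ 1))
      (fun pn => (pn.1 + 1).toNat) (some true)]
  rw [hlen1]
  simp only [List.length_replicate, List.getElem?_replicate, List.getElem?_map, List.getElem?_range]
  by_cases hj : j < ng.toNat
  · simp only [hj, if_true, and_true, true_and]
    simp only [← pvHit1_iff ng rows j]
    by_cases h2a : rows.any (pvHit2f ng j) = true
    · simp [h2a, pvActv, List.getElem?_range, hj]
    · by_cases h1a : pvHit1 ng rows j = true
      · simp [h2a, h1a, pvActv, List.getElem?_range, hj]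
      · simp [h2a, h1a, pvActv, List.getElem?_range, hj]
  · simp [hj]

-- B's per-index active formula computes the same values
theorem pvActiveB_eq (ng : Int) (rows : List (List Int)) :
    ((PySem.List.pyRange 0 ng).map
      (fun k =>
        if
            (if k = ng - 1 then rows.any fun r => decide (r.sum ≥ 1)
              else
                if k = 0 then
                  rows.any fun r => decide (0 < PySem.List.len r) && (PySem.List.pyGetD r 0 0 == 1)
                else
                  decide ((PySem.List.pyGetD rows (k - 1) []).sum ≥ 1) ||
                    rows.any fun r => decide (k < PySem.List.len r) && (PySem.List.pyGetD r k 0 == 1)) =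
              true then
          some true
        else none))
      = (List.range ng.toNat).map (pvActv ng rows) := by
  rw [PySem.List.pyRange_one 0 ng]
  simp only [Int.sub_zero, List.map_map]
  apply List.map_congr_left
  intro x _
  simp only [Function.comp, zero_add]
  have hB : (if (x : Int) = ng - 1 then rows.any fun r => decide (r.sum ≥ 1)
      else
        if (x : Int) = 0 then
          rows.any fun r => decide (0 < PySem.List.len r) && (PySem.List.pyGetD r 0 0 == 1)
        else
          decide ((PySem.List.pyGetD rows ((x : Int) - 1) []).sum ≥ 1) ||
            rows.any fun r => decide ((x : Int) < PySem.List.len r) && (PySem.List.pyGetD r (x : Int) 0 == 1))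
      = (rows.any (pvHit2f ng x) || pvHit1 ng rows x) := by
    by_cases hx1 : (x : Int) = ng - 1
    · have hh1 : pvHit1 ng rows x = false := by
        cases x with
        | zero => rfl
        | succ k =>
          have : (k : Int) = ng - 2 := by push_cast at hx1 ⊢; omega
          simp [pvHit1, this]
      have hh2 : rows.any (pvHit2f ng x) = rows.any (fun r => decide (r.sum ≥ 1)) := by
        apply PySem.List.any_congr_mem
        intro r _
        unfold pvHit2f
        simp [hx1]
      rw [if_pos hx1, hh2, hh1, Bool.or_false]
    · by_cases hx0 : (x : Int) = 0
      · have hx0' : x = 0 := by exact_mod_cast hx0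
        subst hx0'
        have hx1' : ¬ (0 : Int) = ng - 1 := by simpa using hx1
        have hh1 : pvHit1 ng rows 0 = false := rfl
        have hh2 : rows.any (pvHit2f ng 0)
            = rows.any (fun r => decide (0 < PySem.List.len r) && (PySem.List.pyGetD r 0 0 == 1)) := by
          apply PySem.List.any_congr_mem
          intro r _
          unfold pvHit2f
          simp only [PySem.List.len_eq, PySem.List.pyGetD_zero, Nat.cast_zero]
          by_cases hlen : 0 < r.length
          · simp [hlen, hx1', List.getD_eq_getElem?_getD, pvBeqDec, Nat.cast_pos]
          · simp [hlen, hx1', Nat.cast_pos]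
        rw [if_neg hx1, if_pos hx0, hh2, hh1, Bool.or_false]
      · obtain ⟨k, rfl⟩ : ∃ k, x = k + 1 := by
          cases x with
          | zero => exact absurd (by norm_num) hx0
          | succ k => exact ⟨k, rfl⟩
        rw [if_neg hx1, if_neg hx0]
        have hcast : ((k + 1 : Nat) : Int) - 1 = (k : Int) := by push_cast; ring
        have hh1 : pvHit1 ng rows (k + 1)
            = decide ((PySem.List.pyGetD rows ((k : Int)) []).sum ≥ 1) := by
          simp only [pvHit1, PySem.List.pyGetD_natCast]
          have hne : (k : Int) ≠ ng - 2 := by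
            intro h; apply hx1; push_cast; omega
          by_cases hk : k < rows.length
          · simp [hk, hne]
          · have : rows.getD k [] = [] := List.getD_eq_default _ _ (by omega)
            simp [hk, this]
        have hx1' : ¬ ((k : Int) + 1) = ng - 1 := by push_cast at hx1; exact hx1
        have hh2 : rows.any (pvHit2f ng (k + 1))
            = rows.any (fun r => decide (((k + 1 : Nat) : Int) < PySem.List.len r)
                && (PySem.List.pyGetD r ((k + 1 : Nat) : Int) 0 == 1)) := by
          apply PySem.List.any_congr_mem
          intro r _
          unfold pvHit2f
          simp only [PySem.List.len_eq, PySem.List.pyGetD_natCast, Nat.cast_add, Nat.cast_one]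
          by_cases hlen : ((k : Int) + 1) < (r.length : Int)
          · simp [hlen, hx1', List.getD_eq_getElem?_getD, pvBeqDec]
          · simp [hlen, hx1']
        rw [hcast, hh1, hh2, Bool.or_comm]
  rw [hB]
  unfold pvActv
  rfl

theorem pvBuildB_fst (g : List Int) (cnt : Nat) :
    ((List.range cnt).foldl
      (fun (st : List (List Int) × Int) (k : Nat) =>
        (st.1 ++ [PySem.List.slice g (some st.2) (some (st.2 + (1 + (k : Int))))],
         st.2 + (1 + (k : Int)))) ([], 0)).1
      = (pvBuildA g cnt).1 := by
  rw [pvBuildB_eq_foldl]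

-- the per-index sources list (indices of incoming 1-bits, shifted by one)
def pvSrcs (row : List Int) : List Int :=
  ((PySem.List.enumerate row).filter (fun ic => ic.2 == 1)).map (fun ic => ic.1 + 1)

theorem pvSrcs_def (row : List Int) :
    List.map (fun ic => ic.1 + 1)
      (List.filter (fun ic => ic.2 == 1) (PySem.List.enumerate row)) = pvSrcs row := rfl

theorem pvSrcs_eq_foldl (row : List Int) :
    List.foldl (fun acc ic => if ic.2 = 1 then acc ++ [ic.1 + 1] else acc) []
      (PySem.List.enumerate row) = pvSrcs row := by
  rw [PySem.List.foldl_append_ite (fun ic : Int × Int => ic.2 = 1) (fun ic => ic.1 + 1)]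
  simp [pvSrcs, pvBeqDec]

-- does iteration m of A's pre_index loop write, and what does it write?
def pvHitPre (ng : Int) (rows : List (List Int)) (m : Nat) : Bool :=
  decide (pvActv ng rows m = some true) &&
    (decide (m = 0) || decide ((rows.getD (m - 1) []).sum = 0)
      || decide (pvSrcs (rows.getD (m - 1) []) ≠ []))

def pvWPre (ng : Int) (rows : List (List Int)) (m : Nat) : Option (List Int) :=
  if m = 0 then some [0]
  else if (rows.getD (m - 1) []).sum = 0 then some [0]
  else some (pvSrcs (rows.getD (m - 1) []))

-- the pre_index entry both programs store at index m
def pvPreEntry (ng : Int) (rows : List (List Int)) (m : Nat) : Option (List Int) :=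
  if pvHitPre ng rows m then pvWPre ng rows m else none

theorem pvGetActv (ng : Int) (rows : List (List Int)) (x : Nat) (hx : x < ng.toNat) :
    PySem.List.pyGetD ((List.range ng.toNat).map (pvActv ng rows)) (x : Int) none
      = pvActv ng rows x := by
  rw [PySem.List.pyGetD_natCast, List.getD_eq_getElem?_getD]
  simp [List.getElem?_map, List.getElem?_range, hx]

theorem pvPreA_eq (ng : Int) (rows : List (List Int)) :
    (List.foldl
        (fun pre m =>
          if PySem.List.pyGetD ((List.range ng.toNat).map (pvActv ng rows)) m none = some true then
            if m = 0 then PySem.List.pySetD pre m (some [m])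
            else
              if (PySem.List.pyGetD rows (m - 1) []).sum = 0 then
                PySem.List.pySetD pre m (some [0])
              else
                if (List.foldl (fun acc ic => if ic.2 = 1 then acc ++ [ic.1 + 1] else acc) []
                      (PySem.List.enumerate (PySem.List.pyGetD rows (m - 1) []))).length > 0 then
                  PySem.List.pySetD pre m
                    (some (List.foldl (fun acc ic => if ic.2 = 1 then acc ++ [ic.1 + 1] else acc) []
                      (PySem.List.enumerate (PySem.List.pyGetD rows (m - 1) []))))
                else pre
          else pre)
        (List.replicate ng.toNat none) (PySem.List.pyRange 0 ng))
      = (List.range ng.toNat).map (pvPreEntry ng rows) := by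
  rw [PySem.List.pyRange_one 0 ng]
  simp only [Int.sub_zero, List.foldl_map, zero_add]
  have hstep : ∀ (pre : List (Option (List Int))), ∀ x ∈ List.range ng.toNat,
      (if PySem.List.pyGetD ((List.range ng.toNat).map (pvActv ng rows)) (x : Int) none = some true then
        if (x : Int) = 0 then PySem.List.pySetD pre (x : Int) (some [(x : Int)])
        else
          if (PySem.List.pyGetD rows ((x : Int) - 1) []).sum = 0 then
            PySem.List.pySetD pre (x : Int) (some [0])
          else
            if (List.foldl (fun acc ic => if ic.2 = 1 then acc ++ [ic.1 + 1] else acc) []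
                  (PySem.List.enumerate (PySem.List.pyGetD rows ((x : Int) - 1) []))).length > 0 then
              PySem.List.pySetD pre (x : Int)
                (some (List.foldl (fun acc ic => if ic.2 = 1 then acc ++ [ic.1 + 1] else acc) []
                  (PySem.List.enumerate (PySem.List.pyGetD rows ((x : Int) - 1) []))))
            else pre
      else pre)
      = if pvHitPre ng rows x then pre.set x (pvWPre ng rows x) else pre := by
    intro pre x hx
    rw [List.mem_range] at hx
    rw [pvGetActv ng rows x hx]
    simp only [pvSrcs_eq_foldl]
    rcases pvActv_cases ng rows x with hap | hap
    · have hh : pvHitPre ng rows x = false := by simp [pvHitPre, hap]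
      simp [hap, hh]
    · by_cases hx0 : x = 0
      · subst hx0
        have hh : pvHitPre ng rows 0 = true := by simp [pvHitPre, hap]
        simp only [hap, if_true, Nat.cast_zero, if_pos rfl, hh,
          PySem.List.pySetD_of_nonneg _ _ (le_refl (0 : Int))]
        simp [pvWPre]
      · have hx1 : ((x : Int) ≠ 0) := by exact_mod_cast hx0
        have hcast : (x : Int) - 1 = ((x - 1 : Nat) : Int) := by omega
        rw [if_pos hap, if_neg hx1, hcast, PySem.List.pyGetD_natCast]
        by_cases hsum : (rows.getD (x - 1) []).sum = 0
        · have hsum' : (rows[x - 1]?.getD []).sum = 0 := by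
            rwa [List.getD_eq_getElem?_getD] at hsum
          have hh : pvHitPre ng rows x = true := by simp [pvHitPre, hap, hsum']
          rw [if_pos hsum, PySem.List.pySetD_natCast, hh, if_pos rfl]
          simp [pvWPre, hx0, hsum, hsum']
        · have hsum' : ¬ (rows[x - 1]?.getD []).sum = 0 := by
            rwa [List.getD_eq_getElem?_getD] at hsum
          rw [if_neg hsum]
          by_cases hsrcs : pvSrcs (rows.getD (x - 1) []) = []
          · have hsrcs' : pvSrcs (rows[x - 1]?.getD []) = [] := by
              rwa [List.getD_eq_getElem?_getD] at hsrcs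
            have hlen0 : ¬ (pvSrcs (rows.getD (x - 1) [])).length > 0 := by simp [hsrcs']
            have hh : pvHitPre ng rows x = false := by simp [pvHitPre, hx0, hsum', hsrcs']
            rw [if_neg hlen0, hh]
            simp
          · have hsrcs' : ¬ pvSrcs (rows[x - 1]?.getD []) = [] := by
              rwa [List.getD_eq_getElem?_getD] at hsrcs
            have hlen1 : (pvSrcs (rows.getD (x - 1) [])).length > 0 := by
              simpa [List.length_pos_iff] using hsrcs
            have hh : pvHitPre ng rows x = true := by simp [pvHitPre, hsrcs', hap]
            rw [if_pos hlen1, PySem.List.pySetD_natCast, hh, if_pos rfl]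
            simp [pvWPre, hx0, hsum, hsum']
  rw [PySem.List.foldl_congr_mem _ _ _ _ hstep]
  apply List.ext_getElem?
  intro j
  rw [pvGetFoldlRangeSet ng.toNat (pvHitPre ng rows) (pvWPre ng rows)]
  simp only [List.length_replicate, List.getElem?_replicate, List.getElem?_map, List.getElem?_range]
  by_cases hj : j < ng.toNat
  · by_cases hh : pvHitPre ng rows j = true <;>
      simp [hj, hh, pvPreEntry, List.getElem?_range]
  · simp [hj]

theorem pvPreB_eq (ng : Int) (rows : List (List Int)) :
    ((PySem.List.pyRange 0 ng).map
      (fun m =>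
        if PySem.List.pyGetD ((List.range ng.toNat).map (pvActv ng rows)) m none = none then none
        else
          if m = 0 then some [0]
          else
            if (PySem.List.pyGetD rows (m - 1) []).sum = 0 then some [0]
            else
              if List.map (fun ic => ic.1 + 1)
                    (List.filter (fun ic => ic.2 == 1)
                      (PySem.List.enumerate (PySem.List.pyGetD rows (m - 1) []))) = [] then
                none
              else
                some (List.map (fun ic => ic.1 + 1)
                  (List.filter (fun ic => ic.2 == 1)
                    (PySem.List.enumerate (PySem.List.pyGetD rows (m - 1) []))))))
      = (List.range ng.toNat).map (pvPreEntry ng rows) := by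
  rw [PySem.List.pyRange_one 0 ng]
  simp only [Int.sub_zero, List.map_map]
  apply List.map_congr_left
  intro x hx
  rw [List.mem_range] at hx
  simp only [Function.comp, zero_add]
  rw [pvGetActv ng rows x hx]
  rcases pvActv_cases ng rows x with hap | hap
  · have hh : pvHitPre ng rows x = false := by simp [pvHitPre, hap]
    simp [hap, pvPreEntry, hh]
  · have hne : pvActv ng rows x ≠ none := by simp [hap]
    rw [if_neg hne]
    by_cases hx0 : x = 0
    · subst hx0
      have hh : pvHitPre ng rows 0 = true := by simp [pvHitPre, hap]
      simp [pvPreEntry, hh, pvWPre]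
    · have hx1 : ((x : Int) ≠ 0) := by exact_mod_cast hx0
      have hcast : (x : Int) - 1 = ((x - 1 : Nat) : Int) := by omega
      rw [if_neg hx1, hcast, PySem.List.pyGetD_natCast]
      by_cases hsum : (rows.getD (x - 1) []).sum = 0
      · have hsum' : (rows[x - 1]?.getD []).sum = 0 := by
          rwa [List.getD_eq_getElem?_getD] at hsum
        have hh : pvHitPre ng rows x = true := by simp [pvHitPre, hap, hsum']
        simp [hsum, hsum', pvPreEntry, hh, pvWPre, hx0]
      · have hsum' : ¬ (rows[x - 1]?.getD []).sum = 0 := by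
          rwa [List.getD_eq_getElem?_getD] at hsum
        rw [if_neg hsum, pvSrcs_def]
        by_cases hsrcs : pvSrcs (rows.getD (x - 1) []) = []
        · have hsrcs' : pvSrcs (rows[x - 1]?.getD []) = [] := by
            rwa [List.getD_eq_getElem?_getD] at hsrcs
          have hh : pvHitPre ng rows x = false := by simp [pvHitPre, hx0, hsum', hsrcs']
          rw [if_pos hsrcs]
          simp [pvPreEntry, hh]
        · have hsrcs' : ¬ pvSrcs (rows[x - 1]?.getD []) = [] := by
            rwa [List.getD_eq_getElem?_getD] at hsrcs
          have hh : pvHitPre ng rows x = true := by simp [pvHitPre, hsrcs', hap]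
          rw [if_neg hsrcs]
          simp [pvPreEntry, hh, pvWPre, hx0, hsum, hsum']

theorem pvFlatten_vint (l : List Int) (rest : List PvItem) :
    pvFlatten (l.map PvItem.vint ++ rest) = l.map some ++ pvFlatten rest := by
  induction l with
  | nil => simp
  | cons x t ih => simp [pvFlatten, ih]

theorem pvFlatten_items (pl : List (Option (List Int))) :
    pvFlatten (pl.map pvItemOf)
      = pl.flatMap (fun o => match o with | none => [none] | some L => L.map some) := by
  induction pl with
  | nil => simp [pvFlatten]
  | cons o t ih =>
    cases o with
    | none => simp [pvItemOf, pvFlatten, ih]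
    | some L => simp [pvItemOf, pvFlatten, pvFlatten_vint, ih]

theorem pvMem_flatten (pl : List (Option (List Int))) (x : Int) :
    some x ∈ pvFlatten (pl.map pvItemOf) ↔ ∃ L, some L ∈ pl ∧ x ∈ L := by
  rw [pvFlatten_items]
  rw [List.mem_flatMap]
  constructor
  · rintro ⟨o, ho, hx⟩
    cases o with
    | none => simp at hx
    | some L =>
      simp only [List.mem_map, Option.some.injEq] at hx
      obtain ⟨v, hv, rfl⟩ := hx
      exact ⟨L, ho, hv⟩
  · rintro ⟨L, hL, hx⟩
    exact ⟨some L, hL, by simp; exact hx⟩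

theorem pvSrcs_le (row : List Int) (v : Int) (h : v ∈ pvSrcs row) : v ≤ (row.length : Int) := by
  simp only [pvSrcs, List.mem_map, List.mem_filter] at h
  obtain ⟨ic, ⟨hmem, _⟩, rfl⟩ := h
  rw [pvMemEnumerate] at hmem
  obtain ⟨k, hget, hfst⟩ := hmem
  have hk : k < row.length := by
    by_contra hk
    rw [List.getElem?_eq_none (by omega)] at hget
    cases hget
  omega

theorem pvPreEntry_bound (ng : Int) (rows : List (List Int))
    (hrow : ∀ p L, rows[p]? = some L → L.length ≤ p + 1) (m : Nat) (L : List Int)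
    (h : pvPreEntry ng rows m = some L) : ∀ v ∈ L, v ≤ (m : Int) := by
  intro v hv
  unfold pvPreEntry pvWPre at h
  by_cases hh : pvHitPre ng rows m = true
  · rw [if_pos hh] at h
    by_cases hm0 : m = 0
    · subst hm0
      rw [if_pos rfl] at h
      have hL : L = [0] := by simpa using h.symm
      subst hL
      simp at hv
      omega
    · rw [if_neg hm0] at h
      have hlen : ((rows.getD (m - 1) []).length : Int) ≤ (m : Int) := by
        rcases hr : rows[m - 1]? with _ | R
        · simp [List.getD_eq_getElem?_getD, hr]
        · have := hrow (m - 1) R hr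
          simp only [List.getD_eq_getElem?_getD, hr, Option.getD_some]
          omega
      by_cases hsum : (rows.getD (m - 1) []).sum = 0
      · rw [if_pos hsum] at h
        cases h
        simp at hv
        omega
      · rw [if_neg hsum] at h
        cases h
        have := pvSrcs_le (rows.getD (m - 1) []) v hv
        omega
  · rw [if_neg hh] at h
    cases h

theorem pvSuffix_iff (ng : Int) (rows : List (List Int))
    (hrow : ∀ p L, rows[p]? = some L → L.length ≤ p + 1) (t : Nat) :
    (some ((t : Int) + 1) ∈ pvFlatten
        ((((List.range ng.toNat).map (pvPreEntry ng rows)).drop (t + 1)).map pvItemOf))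
      ↔ ((t : Int) + 1) ∈ ((List.range ng.toNat).map (pvPreEntry ng rows)).flatMap
          (fun o => o.getD []) := by
  rw [pvMem_flatten, List.mem_flatMap]
  constructor
  · rintro ⟨L, hL, hx⟩
    exact ⟨some L, List.mem_of_mem_drop hL, by simpa using hx⟩
  · rintro ⟨o, ho, hx⟩
    cases o with
    | none => simp at hx
    | some L =>
      simp only [Option.getD_some] at hx
      refine ⟨L, ?_, hx⟩
      obtain ⟨s, hs⟩ := List.getElem?_of_mem ho
      have hs' : s < ng.toNat ∧ pvPreEntry ng rows s = some L := by
        rcases Nat.lt_or_ge s ng.toNat with h' | h'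
        · refine ⟨h', ?_⟩
          have hrange : (List.range ng.toNat)[s]? = some s := by
            simp [List.getElem?_range, h']
          rw [List.getElem?_map, hrange] at hs
          simpa using hs
        · rw [List.getElem?_eq_none (by simp; omega)] at hs
          cases hs
      have hbound := pvPreEntry_bound ng rows hrow s L hs'.2 _ hx
      have hts : t + 1 ≤ s := by omega
      have : (((List.range ng.toNat).map (pvPreEntry ng rows)).drop (t + 1))[s - (t + 1)]?
          = some (some L) := by
        rw [List.getElem?_drop]
        rw [show t + 1 + (s - (t + 1)) = s by omega]
        exact hs
      exact List.mem_of_getElem? this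

theorem pvFallback_iff (l : List (Option Bool)) :
    ((l.filter (fun a => a != none)).map (fun _ => (1 : Int))).sum = 0
      ↔ ((!(l.any fun a => a != none)) = true) := by
  rw [PySem.List.sum_map_const_int, mul_one]
  rw [show ((l.filter (fun a => a != none)).length : Int) = 0 ↔
      (l.filter (fun a => a != none)).length = 0 by exact_mod_cast Iff.rfl]
  rw [List.length_eq_zero_iff, List.filter_eq_nil_iff]
  simp [List.any_eq_false]

theorem pvOut_eq (ng : Int) (rows : List (List Int))
    (hrow : ∀ p L, rows[p]? = some L → L.length ≤ p + 1) :
    (List.foldl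
        (fun out t =>
          if PySem.List.pyGetD ((List.range ng.toNat).map (pvActv ng rows)) t none = some true ∧
              some (t + 1) ∉ pvFlatten
                (List.map pvItemOf
                  (PySem.List.slice ((List.range ng.toNat).map (pvPreEntry ng rows))
                    (some (t + 1)))) then
            out ++ [t + 1]
          else out)
        [] (PySem.List.pyRange 0 ng))
      = List.map (fun t => t + 1)
          (List.filter
            (fun t =>
              PySem.List.pyGetD ((List.range ng.toNat).map (pvActv ng rows)) t none == some true &&
                !(PySem.Set.ofList
                    (List.flatMap (fun o => o.getD [])
                      ((List.range ng.toNat).map (pvPreEntry ng rows)))).contains (t + 1))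
            (PySem.List.pyRange 0 ng)) := by
  rw [PySem.List.pyRange_one 0 ng]
  simp only [Int.sub_zero, List.foldl_map, List.filter_map, List.map_map, zero_add]
  rw [PySem.List.foldl_append_ite
    (fun x : Nat => PySem.List.pyGetD ((List.range ng.toNat).map (pvActv ng rows)) (x : Int) none = some true ∧
      some ((x : Int) + 1) ∉ pvFlatten
        (List.map pvItemOf
          (PySem.List.slice ((List.range ng.toNat).map (pvPreEntry ng rows)) (some ((x : Int) + 1)))))
    (fun x : Nat => (x : Int) + 1)]
  rw [List.nil_append]
  refine congrArg _ (List.filter_congr ?_)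
  intro x hx
  rw [List.mem_range] at hx
  have hget := pvGetActv ng rows x hx
  have hslice : PySem.List.slice ((List.range ng.toNat).map (pvPreEntry ng rows))
      (some ((x : Int) + 1))
      = ((List.range ng.toNat).map (pvPreEntry ng rows)).drop (x + 1) := by
    rw [show ((x : Int) + 1) = ((x + 1 : Nat) : Int) by push_cast; ring]
    exact PySem.List.slice_from_natCast _ _
  rw [Bool.eq_iff_iff]
  simp only [Function.comp_apply, Function.comp_def, decide_eq_true_eq, hget, hslice,
    Bool.and_eq_true, beq_iff_eq, Bool.not_eq_true', pvSuffix_iff ng rows hrow x]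
  constructor <;> rintro ⟨h1, h2⟩ <;> refine ⟨h1, ?_⟩
  · rw [Bool.eq_false_iff]
    rw [Ne, PySem.Set.contains_iff, PySem.Set.mem_ofList]
    exact h2
  · rw [Bool.eq_false_iff, Ne, PySem.Set.contains_iff, PySem.Set.mem_ofList] at h2
    exact h2

theorem pvMain (node_num : Int) (connect_gene : List Int) :
    check_active node_num connect_gene = check_active_alt node_num connect_gene := by
  simp only [check_active, check_active_alt]
  rw [PySem.List.pyRange_one 0 (node_num - 1), PySem.List.pyRange_one 1 node_num]
  simp only [Int.sub_zero, List.foldl_map, zero_add]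
  rw [pvBuildA_eq_foldl, pvBuildB_fst]
  rw [pvActiveA_eq node_num (pvBuildA connect_gene (node_num - 1).toNat).1]
  rw [pvActiveB_eq node_num (pvBuildA connect_gene (node_num - 1).toNat).1]
  rw [pvPreA_eq node_num (pvBuildA connect_gene (node_num - 1).toNat).1]
  rw [pvPreB_eq node_num (pvBuildA connect_gene (node_num - 1).toNat).1]
  refine congrArg (Prod.mk _) (congrArg (Prod.mk _) ?_)
  refine if_congr (pvFallback_iff _) rfl
    (pvOut_eq node_num (pvBuildA connect_gene (node_num - 1).toNat).1
      (pvBuildA_rowlen connect_gene (node_num - 1).toNat))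

-- ===== VERDICT (by name: the statement is the Claim_ definition above) =====
theorem check_active_spec : Claim_equal_check_active := by
  intro node_num connect_gene _dom
  unfold Spec_check_active
  exact pvMain node_num connect_gene
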